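-- pv_equiv track=rewrite | github.com/anocaj/coding-fluency | micro_patterns/frequency_counting.py | frequency_with_filtering
-- ===== SOURCE A (Python) =====
-- def frequency_with_filtering(text, min_frequency=2):
--     """
--     Analyze character frequency and filter results based on minimum occurrence.
--
--     Args:
--         text: String to analyze
--         min_frequency: Minimum count to include in results
--
--     Returns:
--         dict: Characters that appear at least min_frequency times
--
--     Example:
--         >>> frequency_with_filtering("hello world", 2)
--         {'l': 3}
--     """
--     # Count character frequencies manually
--     char_counts = {}
--     for char in text:
--         if char != ' ':  # Skip spaces for cleaner analysis
--             char_counts[char] = char_counts.get(char, 0) + 1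
--
--     # Filter results based on minimum frequency
--     filtered_results = {char: count for char, count in char_counts.items()
--                        if count >= min_frequency}
--
--     return filtered_results
-- ===== SOURCE B (Python) =====
-- def frequency_with_filtering(text, min_frequency=2):
--     # distinct non-space characters in first-appearance order, then one full scan per character
--     seen = list(dict.fromkeys(c for c in text if c != ' '))
--     result = {}
--     for c in seen:
--         n = sum(1 for x in text if x == c)
--         if n >= min_frequency:
--             result[c] = n
--     return result
-- ===== Notes on version B (the rewrite author's own statement) =====
-- stated objective: alternative
-- what changed: Replaces the single-pass dict tally with a distinct-characters-first strategy: build the ordered set of non-space characters with dict.fromkeys, then compute each character's frequency by a separate scan of the text.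
import Mathlib
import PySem

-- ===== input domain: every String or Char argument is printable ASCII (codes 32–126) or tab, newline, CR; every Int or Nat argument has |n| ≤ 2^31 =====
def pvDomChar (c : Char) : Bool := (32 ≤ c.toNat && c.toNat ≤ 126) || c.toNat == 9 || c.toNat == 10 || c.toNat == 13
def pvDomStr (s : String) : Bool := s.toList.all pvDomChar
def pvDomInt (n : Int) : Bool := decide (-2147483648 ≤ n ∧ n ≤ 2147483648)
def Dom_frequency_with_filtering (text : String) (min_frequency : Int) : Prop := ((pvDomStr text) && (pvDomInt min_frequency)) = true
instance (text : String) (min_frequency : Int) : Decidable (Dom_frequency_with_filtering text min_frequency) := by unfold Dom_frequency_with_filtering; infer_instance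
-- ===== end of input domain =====

-- B replaces A's single-pass dict tally by "distinct non-space chars first, then one counting scan per char" (alternative decomposition, not faster).


-- ===== PORT A =====
-- Python iterates over the string's characters; each Python character is a 1-char string, ported as String.singleton.
-- first fold: the counting loop over text; second fold: the filtering dict comprehension over char_counts.items().
def frequency_with_filtering (text : String) (min_frequency : Int) : List (String × Int) :=
  (text.toList.foldl
      (fun d c => if c ≠ ' ' then d.insert (String.singleton c) (d.getD (String.singleton c) 0 + 1) else d)
      (PySem.Dict.empty : PySem.Dict String Int)).items.foldl
    (fun acc p => if min_frequency ≤ p.2 then acc ++ [p] else acc) []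

-- ===== PORT B =====
-- seen = list(dict.fromkeys(c for c in text if c != ' ')); then one counting scan of text per distinct char.
def frequency_with_filtering_alt (text : String) (min_frequency : Int) : List (String × Int) :=
  (PySem.List.dedup ((text.toList.map String.singleton).filter (fun s => s ≠ " "))).foldl
    (fun result c =>
      let n : Int := (text.toList.map String.singleton).foldl (fun a x => if x == c then a + 1 else a) 0
      if min_frequency ≤ n then result ++ [(c, n)] else result) []

-- ===== PRECONDITION & SPEC =====
def Spec_frequency_with_filtering (text : String) (min_frequency : Int) (out : List (String × Int)) : Prop := out = frequency_with_filtering_alt text min_frequency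
instance (text : String) (min_frequency : Int) (out : List (String × Int)) : Decidable (Spec_frequency_with_filtering text min_frequency out) := by unfold Spec_frequency_with_filtering; infer_instance

-- ===== CLAIM (what is proved, stated in full; the proofs are below) =====
def Claim_equal_frequency_with_filtering : Prop := ∀ (text : String) (min_frequency : Int), Dom_frequency_with_filtering text min_frequency → Spec_frequency_with_filtering text min_frequency (frequency_with_filtering text min_frequency)

-- ===== LEMMAS AND PROOFS =====

theorem singleton_inj : Function.Injective String.singleton := by
  intro a b h
  have := congrArg String.toList h
  simpa using this

-- a conditional fold over l equals the unconditional fold over the filtered list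
theorem foldl_filter_step {α β : Type} (p : α → Prop) [DecidablePred p] (f : β → α → β)
    (l : List α) (b : β) :
    l.foldl (fun d c => if p c then f d c else d) b
      = (l.filter (fun c => decide (p c))).foldl f b := by
  induction l generalizing b with
  | nil => rfl
  | cons x xs ih =>
    by_cases h : p x <;> simp [h, ih]

-- folding a step applied at key (g c) over l = folding the step over l.map g
theorem foldl_map_key {α β : Type} (g : α → β) (f : PySem.Dict β Int → β → PySem.Dict β Int)
    (l : List α) (d : PySem.Dict β Int) :
    l.foldl (fun d c => f d (g c)) d = (l.map g).foldl f d := by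
  induction l generalizing d with
  | nil => rfl
  | cons x xs ih => simp [List.map_cons, ih]

-- the append-if accumulation builds filter-then-map
theorem foldl_append_if_prop {α β : Type} (p : α → Prop) [DecidablePred p] (f : α → β)
    (l : List α) (acc : List β) :
    l.foldl (fun acc c => if p c then acc ++ [f c] else acc) acc
      = acc ++ (l.filter (fun c => decide (p c))).map f := by
  induction l generalizing acc with
  | nil => simp
  | cons x xs ih =>
    by_cases h : p x <;> simp [h, ih]

theorem filter_map_singleton (l : List Char) :
    (l.map String.singleton).filter (fun s => s ≠ " ")
      = (l.filter (fun c => c ≠ ' ')).map String.singleton := by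
  induction l with
  | nil => rfl
  | cons x xs ih =>
    by_cases h : x = ' '
    · subst h; simpa [List.filter_cons] using ih
    · have hs : String.singleton x ≠ " " := by
        intro hc
        exact h (singleton_inj (by simpa using hc))
      simp only [List.map_cons, List.filter_cons]
      simp [h, hs]
      simpa using ih

-- counts in the space-filtered mapped list agree with counts in the fully mapped list, for its members
theorem count_agree (L : List Char) (k : String)
    (hk : k ∈ (L.filter (fun c => c ≠ ' ')).map String.singleton) :
    ((L.filter (fun c => c ≠ ' ')).map String.singleton).count k
      = (L.map String.singleton).count k := by
  rcases List.mem_map.1 hk with ⟨c, hc, rfl⟩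
  have hcne : c ≠ ' ' := by simpa using (List.mem_filter.1 hc).2
  rw [List.count_map_of_injective _ _ singleton_inj,
      List.count_map_of_injective _ _ singleton_inj]
  exact List.count_filter (by simpa using hcne)

theorem frequency_with_filtering_spec : Claim_equal_frequency_with_filtering := by
  intro text m _
  unfold Spec_frequency_with_filtering frequency_with_filtering frequency_with_filtering_alt
  rw [foldl_filter_step (fun c => c ≠ ' ')
        (fun (d : PySem.Dict String Int) (c : Char) =>
          d.insert (String.singleton c) (d.getD (String.singleton c) 0 + 1)) text.toList PySem.Dict.empty,
      foldl_map_key String.singleton (fun d s => d.insert s (d.getD s 0 + 1)),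
      PySem.Dict.foldl_insert_getD_add_one_eq_counter,
      PySem.Dict.items_counter]
  rw [foldl_append_if_prop (fun p : String × Int => m ≤ p.2) (fun p => p), List.nil_append,
      List.filter_map]
  rw [filter_map_singleton, PySem.List.dedup_eq_ofList]
  set M' := (text.toList.filter (fun c => c ≠ ' ')).map String.singleton with hM'
  set S := PySem.Set.ofList M' with hS
  have hmem : ∀ k ∈ S, k ∈ M' := fun k hk => (PySem.Set.mem_ofList M' k).1 hk
  -- B side: evaluate the inner counting fold, then the append-if fold
  have hB : (S.foldl (fun result c =>
      let n : Int := (text.toList.map String.singleton).foldl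
        (fun a x => if x == c then a + 1 else a) 0
      if m ≤ n then result ++ [(c, n)] else result) ([] : List (String × Int)))
      = (S.filter (fun c => decide (m ≤ (((text.toList.map String.singleton).count c : Nat) : Int)))).map
          (fun c => (c, (((text.toList.map String.singleton).count c : Nat) : Int))) := by
    have hfun : (fun (result : List (String × Int)) (c : String) =>
        let n : Int := (text.toList.map String.singleton).foldl (fun a x => if x == c then a + 1 else a) 0
        if m ≤ n then result ++ [(c, n)] else result)
      = fun result c => if m ≤ (((text.toList.map String.singleton).count c : Nat) : Int)
          then result ++ [(c, (((text.toList.map String.singleton).count c : Nat) : Int))] else result := by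
      funext result c
      simp only [PySem.List.foldl_beq_add_one, Int.zero_add]
    rw [hfun,
        foldl_append_if_prop (fun c : String => m ≤ (((text.toList.map String.singleton).count c : Nat) : Int))
          (fun c : String => (c, (((text.toList.map String.singleton).count c : Nat) : Int))) S [],
        List.nil_append]
  rw [hB]
  -- align the two filter+map expressions using count agreement on members of S
  have hfilter : S.filter ((fun c : String × Int => decide (m ≤ c.2)) ∘ (fun k => (k, ((M'.count k : Nat) : Int))))
      = S.filter (fun c => decide (m ≤ (((text.toList.map String.singleton).count c : Nat) : Int))) := by
    apply List.filter_congr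
    intro k hk
    have h := count_agree text.toList k (hmem k hk)
    simp only [Function.comp_apply, hM']
    rw [h]
  rw [hfilter, List.map_id']
  apply List.map_congr_left
  intro k hk
  have hkS : k ∈ S := List.mem_of_mem_filter hk
  have h := count_agree text.toList k (hmem k hkS)
  simp only [hM']
  rw [h]
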